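-- pv_equiv track=rewrite | github.com/jcpina01-gif/decide-core | backend/routers/run_model.py | _parse_exclude_tickers
-- ===== SOURCE A (Python) =====
-- def _parse_exclude_tickers(raw: str | None) -> list[str]:
--     if not raw:
--         return []
--     out: list[str] = []
--     for tok in str(raw).split(","):
--         t = tok.strip().upper()
--         if not t:
--             continue
--         if not all(ch.isalnum() or ch in ".-" for ch in t):
--             continue
--         out.append(t)
--     # De acordo com UI do cliente B (máximo 5 exclusões)
--     return list(dict.fromkeys(out))[:5]
-- ===== SOURCE B (Python) =====
-- def _parse_exclude_tickers(raw):
--     # Recursive budgeted selection: scan for the next valid ticker, emit it,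
--     # filter its later duplicates out of the remainder, recurse with one slot
--     # fewer (5 slots total) -- no dedup table and no post-hoc slice.
--     if not raw:
--         return []
--
--     def pick(toks, k):
--         i = 0
--         while i < len(toks) and k > 0:
--             t = toks[i].strip().upper()
--             i += 1
--             if t and all(ch.isalnum() or ch in ".-" for ch in t):
--                 rest = [u for u in toks[i:] if u.strip().upper() != t]
--                 return [t] + pick(rest, k - 1)
--         return []
--
--     return pick(str(raw).split(","), 5)
-- ===== Notes on version B (the rewrite author's own statement) =====
-- stated objective: alternative
-- what changed: Replaces A's collect-all / dict.fromkeys-dedup / slice pipeline with a recursive budgeted selection: find the next valid ticker, filter its duplicates out of the remaining tokens, and recurse with one of 5 slots fewer, so no dedup table and no final slice exist.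
import Mathlib
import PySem

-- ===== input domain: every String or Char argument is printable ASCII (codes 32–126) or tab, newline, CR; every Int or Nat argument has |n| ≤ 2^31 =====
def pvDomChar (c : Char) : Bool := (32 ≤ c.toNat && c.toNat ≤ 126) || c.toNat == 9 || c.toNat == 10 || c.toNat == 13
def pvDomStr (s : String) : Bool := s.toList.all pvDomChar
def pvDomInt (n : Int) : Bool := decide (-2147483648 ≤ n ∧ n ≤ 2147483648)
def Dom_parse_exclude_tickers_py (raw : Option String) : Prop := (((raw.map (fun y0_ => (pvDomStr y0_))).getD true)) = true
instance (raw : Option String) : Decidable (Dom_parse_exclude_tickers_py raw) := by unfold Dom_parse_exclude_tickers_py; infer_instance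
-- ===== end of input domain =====

-- B replaces A's collect-all / ordered-dedup / slice pipeline by a recursive budgeted
-- selection: emit the next valid ticker, filter its later duplicates from the remainder,
-- recurse with one of 5 slots fewer (objective: alternative decomposition, same cost).


-- shared per-token helpers (this code is identical in both Pythons): t = tok.strip().upper()
def pvClean (tok : String) : String := PySem.Str.upper (PySem.Str.strip tok)
-- all(ch.isalnum() or ch in ".-" for ch in t)
def pvTokValid (t : String) : Bool :=
  t.toList.all (fun ch => PySem.Chars.isalnum ch || PySem.Chars.isIn [ch] ['.', '-'])
-- 'if t and all(...)' — the combined keep test on a cleaned token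
def pvKeep (t : String) : Bool := (!(t == "")) && pvTokValid t

-- ===== PORT A =====
-- the body of A's for-loop (strip/upper, skip empty, skip invalid, append)
def pvStepA (out : List String) (tok : String) : List String :=
  let t := pvClean tok
  if t == "" then out
  else if !(pvTokValid t) then out
  else out ++ [t]

def parse_exclude_tickers_py (raw : Option String) : List String :=
  match raw with
  | none => []
  | some s =>
    if s == "" then []
    else
      -- str(raw).split(","): the separator "," is non-empty, so split? is always `some`
      (PySem.List.dedup (((PySem.Str.split? s ",").getD []).foldl pvStepA [])).take 5

-- ===== PORT B =====
-- B's pick(toks, k): the while loop scanning for the next valid token becomes the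
-- skip-branch recursion on the list tail; on a hit it emits t, filters t's duplicates
-- out of the remainder and recurses with budget k-1.
def pvPick : List String → Nat → List String
  | [], _ => []
  | _ :: _, 0 => []
  | tok :: rest, Nat.succ k =>
    let t := pvClean tok
    if pvKeep t then
      t :: pvPick (rest.filter (fun u => !(pvClean u == t))) k
    else
      pvPick rest (Nat.succ k)
termination_by toks _ => toks.length
decreasing_by
  · simpa using Nat.lt_succ_of_le (le_trans (List.length_filter_le _ _) (by simp))
  · simp

def parse_exclude_tickers_py_alt (raw : Option String) : List String :=
  match raw with
  | none => []
  | some s =>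
    if s == "" then []
    else pvPick ((PySem.Str.split? s ",").getD []) 5

-- ===== PRECONDITION & SPEC =====
def Spec_parse_exclude_tickers_py (raw : Option String) (out : List String) : Prop := out = parse_exclude_tickers_py_alt raw
instance (raw : Option String) (out : List String) : Decidable (Spec_parse_exclude_tickers_py raw out) := by unfold Spec_parse_exclude_tickers_py; infer_instance

-- ===== CLAIM (what is proved, stated in full; the proofs are below) =====
def Claim_equal_parse_exclude_tickers_py : Prop := ∀ (raw : Option String), Dom_parse_exclude_tickers_py raw → Spec_parse_exclude_tickers_py raw (parse_exclude_tickers_py raw)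

-- ===== LEMMAS AND PROOFS =====

-- reference ordered dedup by filtering later duplicates (proof-only)
def pvDedupR : List String → List String
  | [] => []
  | x :: xs => x :: pvDedupR (xs.filter (fun y => !(y == x)))
termination_by xs => xs.length
decreasing_by simpa using Nat.lt_succ_of_le (le_trans (List.length_filter_le _ _) (by simp))

lemma pvStepA_keep (out : List String) (tok : String) (h : pvKeep (pvClean tok) = true) :
    pvStepA out tok = out ++ [pvClean tok] := by
  simp only [pvKeep, Bool.and_eq_true, Bool.not_eq_eq_eq_not, Bool.not_true,
    beq_eq_false_iff_ne] at h
  simp [pvStepA, h.1, h.2]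

lemma pvStepA_skip (out : List String) (tok : String) (h : pvKeep (pvClean tok) = false) :
    pvStepA out tok = out := by
  simp only [pvKeep, Bool.and_eq_false_iff, Bool.not_eq_eq_eq_not, Bool.not_false,
    beq_iff_eq] at h
  rcases h with h | h
  · simp [pvStepA, h]
  · simp [pvStepA, h]

-- A's fold collects exactly the cleaned tokens that pass the test, in order
lemma pvA_fold_eq (toks : List String) (acc : List String) :
    toks.foldl pvStepA acc = acc ++ ((toks.map pvClean).filter pvKeep) := by
  induction toks generalizing acc with
  | nil => simp
  | cons tok rest ih =>
    rw [List.foldl_cons, ih]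
    cases hk : pvKeep (pvClean tok) with
    | true => rw [pvStepA_keep _ _ hk]; simp [hk]
    | false => rw [pvStepA_skip _ _ hk]; simp [hk]

-- PySem's ordered dedup (first occurrences) equals filtering later duplicates
lemma foldl_add_eq_dedupR (xs s : List String) :
    xs.foldl PySem.Set.add s = s ++ pvDedupR (xs.filter (fun y => !(s.contains y))) := by
  induction xs generalizing s with
  | nil => simp [pvDedupR]
  | cons x rest ih =>
    rw [List.foldl_cons, List.filter_cons]
    cases hc : s.contains x with
    | true =>
      have hadd : PySem.Set.add s x = s := by
        unfold PySem.Set.add PySem.Set.contains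
        rw [if_pos hc]
      rw [hadd, Bool.not_true, if_neg (by simp)]
      exact ih s
    | false =>
      have hadd : PySem.Set.add s x = s ++ [x] := by
        unfold PySem.Set.add PySem.Set.contains
        rw [if_neg (by simpa using hc)]
      rw [hadd, Bool.not_false, if_pos rfl, ih (s ++ [x])]
      rw [List.append_assoc]
      congr 1
      rw [pvDedupR, List.filter_filter, List.singleton_append]
      refine congrArg₂ List.cons rfl (congrArg pvDedupR (List.filter_congr (fun y _ => ?_)))
      cases hy : (y == x) with
      | true =>
        have : y = x := eq_of_beq hy
        subst this
        simp
      | false =>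
        have hne : y ≠ x := by simpa using hy
        simp [hne]

lemma dedup_eq_dedupR (xs : List String) :
    PySem.List.dedup xs = pvDedupR xs := by
  rw [PySem.List.dedup_eq_ofList, PySem.Set.ofList_eq_foldl,
    foldl_add_eq_dedupR xs []]
  simp

-- unfolding lemmas for B's pick
lemma pvPick_nil (k : Nat) : pvPick [] k = [] := by rw [pvPick]

lemma pvPick_zero (tok : String) (rest : List String) : pvPick (tok :: rest) 0 = [] := by
  rw [pvPick]

lemma pvPick_keep (tok : String) (rest : List String) (k : Nat) (h : pvKeep (pvClean tok) = true) :
    pvPick (tok :: rest) (k+1)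
      = pvClean tok :: pvPick (rest.filter (fun u => !(pvClean u == pvClean tok))) k := by
  rw [pvPick]; simp [h]

lemma pvPick_skip (tok : String) (rest : List String) (k : Nat) (h : pvKeep (pvClean tok) = false) :
    pvPick (tok :: rest) (k+1) = pvPick rest (k+1) := by
  rw [pvPick]; simp [h]

-- filtering out t's duplicates before cleaning equals cleaning/keeping first, then filtering
lemma filter_map_comm (t : String) (rest : List String) :
    ((rest.filter (fun u => !(pvClean u == t))).map pvClean).filter pvKeep
      = ((rest.map pvClean).filter pvKeep).filter (fun y => !(y == t)) := by
  simp only [List.filter_map, List.filter_filter]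
  simp only [Function.comp]
  exact congrArg (List.map pvClean) (List.filter_congr (fun u _ => Bool.and_comm _ _))

-- B's pick computes take k of the later-duplicate-filtering dedup of the kept cleaned tokens
lemma pvPick_eq (n : Nat) : ∀ (toks : List String) (k : Nat), toks.length ≤ n →
    pvPick toks k = (pvDedupR ((toks.map pvClean).filter pvKeep)).take k := by
  induction n with
  | zero =>
    intro toks k h
    have : toks = [] := List.eq_nil_of_length_eq_zero (Nat.le_zero.mp h)
    subst this
    simp [pvPick_nil, pvDedupR]
  | succ n ih =>
    intro toks k h
    cases toks with
    | nil => simp [pvPick_nil, pvDedupR]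
    | cons tok rest =>
      have hr : rest.length ≤ n := Nat.le_of_succ_le_succ h
      cases k with
      | zero => simp [pvPick_zero]
      | succ k =>
        cases hk : pvKeep (pvClean tok) with
        | false =>
          rw [pvPick_skip _ _ _ hk, ih rest (k+1) hr]
          simp [hk]
        | true =>
          rw [pvPick_keep _ _ _ hk,
            ih _ k (le_trans (List.length_filter_le _ _) hr), filter_map_comm]
          have hcons : ((tok :: rest).map pvClean).filter pvKeep
              = pvClean tok :: ((rest.map pvClean).filter pvKeep) := by
            simp [hk]
          rw [hcons, pvDedupR, List.take_succ_cons]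

-- ===== VERDICT (by name: the statement is the Claim_ definition above) =====
theorem parse_exclude_tickers_py_spec : Claim_equal_parse_exclude_tickers_py := by
  intro raw _
  unfold Spec_parse_exclude_tickers_py
  cases raw with
  | none => rfl
  | some s =>
    simp only [parse_exclude_tickers_py, parse_exclude_tickers_py_alt]
    by_cases hs : (s == "") = true
    · rw [if_pos hs, if_pos hs]
    · rw [if_neg hs, if_neg hs, pvA_fold_eq, List.nil_append, dedup_eq_dedupR,
        pvPick_eq (((PySem.Str.split? s ",").getD []).length) _ 5 le_rfl]
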